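-- pv_equiv track=rewrite | github.com/AlTrubinov/algorithm_tasks | my_lomonosov_task_2.py | border_search
-- ===== SOURCE A (Python) =====
-- def border_search(searched_list):
--     set_list = set(searched_list)
--     if len(set_list) == len(searched_list) or len(set_list) == 1:
--         return f'{0}, {len(set_list) - 1}'
--
--     first_pointer, second_pointer = 0, 0
--     list_of_borders = []
--     max_range = 0
--     index_max_borders = 0
--
--     while second_pointer < len(searched_list) - 1:
--         if searched_list[second_pointer] < searched_list[second_pointer + 1]:
--             second_pointer += 1
--         else:
--             list_of_borders.append([first_pointer, second_pointer])
--             second_pointer += 1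
--             first_pointer = second_pointer
--
--     list_of_borders.append([first_pointer, second_pointer])
--
--     first_pointer, second_pointer = 0, 0
--
--     while second_pointer < len(searched_list) - 1:
--         if searched_list[second_pointer] > searched_list[second_pointer + 1]:
--             second_pointer += 1
--         else:
--             list_of_borders.append([first_pointer, second_pointer])
--             second_pointer += 1
--             first_pointer = second_pointer
--
--     list_of_borders.append([first_pointer, second_pointer])
--
--     for index in range(len(list_of_borders)):
--         left_border = list_of_borders[index][0]
--         right_border = list_of_borders[index][1]
--         difference = abs(right_border - left_border)
--         if difference > max_range:
--             max_range = difference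
--             index_max_borders = index
--     return f'{list_of_borders[index_max_borders][0]}, {list_of_borders[index_max_borders][1]}'
-- ===== SOURCE B (Python) =====
-- def border_search(searched_list):
--     distinct = set(searched_list)
--     if len(distinct) == len(searched_list) or len(distinct) == 1:
--         return f'{0}, {len(distinct) - 1}'
--     # single pass: track current increasing-run start and decreasing-run start,
--     # keep the earliest longest run of each kind; increasing wins ties.
--     inc_start = dec_start = 0
--     best_inc = best_dec = (0, 0)
--     len_inc = len_dec = 0
--     for i in range(1, len(searched_list)):
--         if searched_list[i - 1] < searched_list[i]:
--             if i - inc_start > len_inc: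
--                 len_inc = i - inc_start
--                 best_inc = (inc_start, i)
--         else:
--             inc_start = i
--         if searched_list[i - 1] > searched_list[i]:
--             if i - dec_start > len_dec:
--                 len_dec = i - dec_start
--                 best_dec = (dec_start, i)
--         else:
--             dec_start = i
--     s, e = best_dec if len_dec > len_inc else best_inc
--     return f'{s}, {e}'
-- ===== Notes on version B (the rewrite author's own statement) =====
-- stated objective: simpler
-- what changed: Instead of materialising every increasing and decreasing run in a list and rescanning it for the first maximal difference, B does one pass that tracks the current increasing-run start and decreasing-run start and keeps the earliest longest run of each kind inline, then picks the decreasing best only if strictly longer (so increasing runs and earlier positions win ties exactly as in A); dropping the intermediate run list and the extra scan is a constant-factor win.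
import Mathlib
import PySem

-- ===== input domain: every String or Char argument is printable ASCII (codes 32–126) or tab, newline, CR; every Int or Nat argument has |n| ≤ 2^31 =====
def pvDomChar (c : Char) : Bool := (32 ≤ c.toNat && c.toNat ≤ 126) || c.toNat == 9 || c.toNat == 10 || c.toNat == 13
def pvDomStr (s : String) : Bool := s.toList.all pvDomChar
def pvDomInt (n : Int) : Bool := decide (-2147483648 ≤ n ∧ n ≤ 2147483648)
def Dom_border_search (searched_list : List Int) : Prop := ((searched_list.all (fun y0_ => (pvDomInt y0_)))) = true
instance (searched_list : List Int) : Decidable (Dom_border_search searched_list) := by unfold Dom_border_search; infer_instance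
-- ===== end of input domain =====

-- B replaces A's run-list-then-rescan with a single pass keeping the best runs inline (objective: simpler).

-- ===== PORT A =====
-- Literal port of A: set guard, two run-collecting while-loops (folds over the same
-- index ranges, second_pointer threaded in the state), then the indexed max scan.
-- In-range list indexing l[i] is ported as PySem.List.pyGetD l i 0 (the loops only
-- index inside the list, so this is exact).
-- A-side helper: one while-loop of A, collecting strictly-increasing runs
def pvIncRunsA (l : List Int) (r : List Int) (init : Int × Int × List (Int × Int)) :
    Int × Int × List (Int × Int) :=
  r.foldl
    (fun st _ =>
      if PySem.List.pyGetD l st.2.1 0 < PySem.List.pyGetD l (st.2.1 + 1) 0 then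
        (st.1, st.2.1 + 1, st.2.2)
      else (st.2.1 + 1, st.2.1 + 1, st.2.2 ++ [(st.1, st.2.1)]))
    init

-- A-side helper: the second while-loop (strictly-decreasing runs)
def pvDecRunsA (l : List Int) (r : List Int) (init : Int × Int × List (Int × Int)) :
    Int × Int × List (Int × Int) :=
  r.foldl
    (fun st _ =>
      if PySem.List.pyGetD l st.2.1 0 > PySem.List.pyGetD l (st.2.1 + 1) 0 then
        (st.1, st.2.1 + 1, st.2.2)
      else (st.2.1 + 1, st.2.1 + 1, st.2.2 ++ [(st.1, st.2.1)]))
    init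

-- A-side helper: A's final for-loop over range(len(borders)) tracking (max_range, index)
def pvScanA (bs : List (Int × Int)) : Int × Int :=
  (PySem.List.pyRange 0 (bs.length : Int) 1).foldl
    (fun (st : Int × Int) (idx : Int) =>
      let r := PySem.List.pyGetD bs idx ((0 : Int), (0 : Int))
      if |r.2 - r.1| > st.1 then (|r.2 - r.1|, idx) else st)
    (0, 0)

def border_search (searched_list : List Int) : String :=
  let set_list := PySem.Set.ofList searched_list
  if set_list.length = searched_list.length ∨ set_list.length = 1 then
    PySem.Int.toStr 0 ++ ", " ++ PySem.Int.toStr ((set_list.length : Int) - 1)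
  else
    let n : Int := searched_list.length
    let s1 := pvIncRunsA searched_list (PySem.List.pyRange 0 (n - 1) 1) (0, 0, [])
    let borders1 := s1.2.2 ++ [(s1.1, s1.2.1)]
    let s2 := pvDecRunsA searched_list (PySem.List.pyRange 0 (n - 1) 1) (0, 0, borders1)
    let borders := s2.2.2 ++ [(s2.1, s2.2.1)]
    let fin := pvScanA borders
    let chosen := PySem.List.pyGetD borders fin.2 ((0 : Int), (0 : Int))
    PySem.Int.toStr chosen.1 ++ ", " ++ PySem.Int.toStr chosen.2

-- ===== PORT B =====
-- Literal port of Source B: same set guard, then ONE fold over range(1, n) whose state is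
-- (inc_start, best_inc, len_inc) × (dec_start, best_dec, len_dec); finally the
-- decreasing best is taken only if strictly longer.
-- B-side helper: the body of Source B's single for-loop
def pvStepB (l : List Int) (st : (Int × (Int × Int) × Int) × (Int × (Int × Int) × Int))
    (i : Int) : (Int × (Int × Int) × Int) × (Int × (Int × Int) × Int) :=
  let inc := st.1
  let dec := st.2
  let inc' :=
    if PySem.List.pyGetD l (i - 1) 0 < PySem.List.pyGetD l i 0 then
      (inc.1, if i - inc.1 > inc.2.2 then ((inc.1, i), i - inc.1) else inc.2)
    else (i, inc.2)
  let dec' :=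
    if PySem.List.pyGetD l (i - 1) 0 > PySem.List.pyGetD l i 0 then
      (dec.1, if i - dec.1 > dec.2.2 then ((dec.1, i), i - dec.1) else dec.2)
    else (i, dec.2)
  (inc', dec')

def border_search_alt (searched_list : List Int) : String :=
  let distinct := PySem.Set.ofList searched_list
  if distinct.length = searched_list.length ∨ distinct.length = 1 then
    PySem.Int.toStr 0 ++ ", " ++ PySem.Int.toStr ((distinct.length : Int) - 1)
  else
    let st := (PySem.List.pyRange 1 (searched_list.length : Int) 1).foldl
      (pvStepB searched_list) ((0, (0, 0), 0), (0, (0, 0), 0))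
    let best := if st.2.2.2 > st.1.2.2 then st.2.2.1 else st.1.2.1
    PySem.Int.toStr best.1 ++ ", " ++ PySem.Int.toStr best.2

-- ===== PRECONDITION & SPEC =====
def Spec_border_search (searched_list : List Int) (out : String) : Prop := out = border_search_alt searched_list
instance (searched_list : List Int) (out : String) : Decidable (Spec_border_search searched_list out) := by unfold Spec_border_search; infer_instance

-- ===== CLAIM (what is proved, stated in full; the proofs are below) =====
def Claim_equal_border_search : Prop := ∀ (searched_list : List Int), Dom_border_search searched_list → Spec_border_search searched_list (border_search searched_list)

-- ===== LEMMAS AND PROOFS =====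

-- "pick the first strict record of |r.2 - r.1|" scan, seeded with (best, max)
def pvPick (rs : List (Int × Int)) (st : (Int × Int) × Int) : (Int × Int) × Int :=
  rs.foldl (fun st r => if |r.2 - r.1| > st.2 then (r, |r.2 - r.1|) else st) st

-- generic form of A's run-collecting loop (cmp = (<) or (>))
def pvAloop (cmp : Int → Int → Bool) (l : List Int) (r : List Int)
    (init : Int × Int × List (Int × Int)) : Int × Int × List (Int × Int) :=
  r.foldl
    (fun st _ =>
      if cmp (PySem.List.pyGetD l st.2.1 0) (PySem.List.pyGetD l (st.2.1 + 1) 0) then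
        (st.1, st.2.1 + 1, st.2.2)
      else
        (st.2.1 + 1, st.2.1 + 1, st.2.2 ++ [(st.1, st.2.1)]))
    init

-- generic form of one component of B's loop
def pvBloop (cmp : Int → Int → Bool) (l : List Int) (r : List Int)
    (init : Int × (Int × Int) × Int) : Int × (Int × Int) × Int :=
  r.foldl
    (fun st i =>
      if cmp (PySem.List.pyGetD l (i - 1) 0) (PySem.List.pyGetD l i 0) then
        (st.1, if i - st.1 > st.2.2 then ((st.1, i), i - st.1) else st.2)
      else (i, st.2))
    init

theorem pvPick_append (bs : List (Int × Int)) (r : Int × Int) (st : (Int × Int) × Int) :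
    pvPick (bs ++ [r]) st =
      (if |r.2 - r.1| > (pvPick bs st).2 then (r, |r.2 - r.1|) else pvPick bs st) := by
  simp [pvPick, List.foldl_append]

theorem pvPick_nonneg (bs : List (Int × Int)) (st : (Int × Int) × Int) (h : 0 ≤ st.2) :
    0 ≤ (pvPick bs st).2 := by
  induction bs generalizing st with
  | nil => simpa [pvPick] using h
  | cons r t ih =>
    simp only [pvPick, List.foldl_cons]
    split
    · exact ih _ (by positivity)
    · exact ih _ h

theorem pvPick_mono (bs : List (Int × Int)) (st : (Int × Int) × Int) :
    st.2 ≤ (pvPick bs st).2 := by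
  induction bs generalizing st with
  | nil => simp [pvPick]
  | cons r t ih =>
    simp only [pvPick, List.foldl_cons]
    split
    · exact le_trans (le_of_lt (by assumption)) (ih _)
    · exact ih _

theorem pvPick_le_mem (bs : List (Int × Int)) (st : (Int × Int) × Int)
    (r : Int × Int) (hr : r ∈ bs) : |r.2 - r.1| ≤ (pvPick bs st).2 := by
  induction bs generalizing st with
  | nil => simp at hr
  | cons q t ih =>
    rcases List.mem_cons.mp hr with h | h
    · subst h
      simp only [pvPick, List.foldl_cons]
      split
      · exact pvPick_mono t _
      · exact le_trans (by omega) (pvPick_mono t _)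
    · simp only [pvPick, List.foldl_cons]
      exact ih _ h

theorem pvPick_shift (bs : List (Int × Int)) (b : Int × Int) (m : Int) (hm : 0 ≤ m) :
    pvPick bs (b, m) =
      (if (pvPick bs ((0, 0), 0)).2 > m then (pvPick bs ((0, 0), 0)).1 else b,
       max m (pvPick bs ((0, 0), 0)).2) := by
  induction bs generalizing b m with
  | nil =>
    simp only [pvPick, List.foldl_nil]
    rw [if_neg (by omega), max_eq_left hm]
  | cons r t ih =>
    have hdr : 0 ≤ |r.2 - r.1| := abs_nonneg _
    simp only [pvPick, List.foldl_cons] at *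
    by_cases hdm : |r.2 - r.1| > m
    · rw [if_pos hdm, if_pos (show |r.2 - r.1| > 0 from by omega)]
      have h2 : |r.2 - r.1| ≤ (pvPick t (r, |r.2 - r.1|)).2 := pvPick_mono t _
      simp only [pvPick] at h2
      rw [if_pos (by omega), max_eq_right (by omega)]
    · rw [if_neg hdm, ih b m hm]
      by_cases hd0 : |r.2 - r.1| > 0
      · rw [if_pos hd0, ih r _ (le_of_lt hd0)]
        by_cases hT : (List.foldl (fun st r => if |r.2 - r.1| > st.2 then (r, |r.2 - r.1|) else st) ((0, 0), 0) t).2 > m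
        · rw [if_pos (show ((if _ > _ then _ else r, max (|r.2 - r.1|) _) : (Int × Int) × Int).2 > m from by omega)]
          rw [if_pos hT, if_pos (show _ > |r.2 - r.1| from by omega)]
          exact Prod.ext rfl (by show max m _ = max m (max _ _); omega)
        · rw [if_neg (show ¬ ((if _ > _ then _ else r, max (|r.2 - r.1|) _) : (Int × Int) × Int).2 > m from by omega)]
          rw [if_neg hT]
          exact Prod.ext rfl (by show max m _ = max m (max _ _); omega)
      · rw [if_neg hd0]

-- the bs component of pvAloop is append-only
theorem pvAloop_bs (cmp : Int → Int → Bool) (l : List Int) (r : List Int)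
    (fp sp : Int) (bs : List (Int × Int)) :
    pvAloop cmp l r (fp, sp, bs) =
      ((pvAloop cmp l r (fp, sp, [])).1, (pvAloop cmp l r (fp, sp, [])).2.1,
        bs ++ (pvAloop cmp l r (fp, sp, [])).2.2) := by
  induction r generalizing fp sp bs with
  | nil => simp [pvAloop]
  | cons a r' ih =>
    simp only [pvAloop, List.foldl_cons] at *
    by_cases hc : cmp (PySem.List.pyGetD l sp 0) (PySem.List.pyGetD l (sp + 1) 0) = true
    · rw [if_pos hc, if_pos hc, ih]
    · rw [if_neg hc, if_neg hc, ih (sp + 1) (sp + 1) (bs ++ [(fp, sp)]),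
        ih (sp + 1) (sp + 1) ([] ++ [(fp, sp)])]
      simp

-- the simulation invariant between A's run collection and B's inline best
theorem pvSim (cmp : Int → Int → Bool) (l : List Int) (k : Nat) :
    (pvAloop cmp l (PySem.List.pyRange 0 (k : Int) 1) (0, 0, [])).2.1 = (k : Int) ∧
    (pvBloop cmp l (PySem.List.pyRange 1 ((k : Int) + 1) 1) (0, (0, 0), 0)).1 =
      (pvAloop cmp l (PySem.List.pyRange 0 (k : Int) 1) (0, 0, [])).1 ∧
    0 ≤ (pvAloop cmp l (PySem.List.pyRange 0 (k : Int) 1) (0, 0, [])).1 ∧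
    (pvAloop cmp l (PySem.List.pyRange 0 (k : Int) 1) (0, 0, [])).1 ≤ (k : Int) ∧
    (pvBloop cmp l (PySem.List.pyRange 1 ((k : Int) + 1) 1) (0, (0, 0), 0)).2 =
      pvPick ((pvAloop cmp l (PySem.List.pyRange 0 (k : Int) 1) (0, 0, [])).2.2 ++
        [((pvAloop cmp l (PySem.List.pyRange 0 (k : Int) 1) (0, 0, [])).1, (k : Int))]) ((0, 0), 0) ∧
    (((pvAloop cmp l (PySem.List.pyRange 0 (k : Int) 1) (0, 0, [])).2.2 ++
        [((pvAloop cmp l (PySem.List.pyRange 0 (k : Int) 1) (0, 0, [])).1, (k : Int))]).headD (0, 0)).1 = 0 ∧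
    0 ≤ (((pvAloop cmp l (PySem.List.pyRange 0 (k : Int) 1) (0, 0, [])).2.2 ++
        [((pvAloop cmp l (PySem.List.pyRange 0 (k : Int) 1) (0, 0, [])).1, (k : Int))]).headD (0, 0)).2 := by
  induction k with
  | zero =>
    rw [show ((0 : Nat) : Int) = 0 from rfl]
    rw [PySem.List.pyRange_one_eq_nil (le_refl (0 : Int)),
      PySem.List.pyRange_one_eq_nil (by norm_num : (0 : Int) + 1 ≤ 1)]
    refine ⟨rfl, rfl, le_refl _, le_refl _, ?_, rfl, le_refl _⟩
    simp [pvAloop, pvBloop, pvPick]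
  | succ k ih =>
    obtain ⟨ih1, ih2, ih3, ih4, ih5, ih6, ih7⟩ := ih
    push_cast
    rw [PySem.List.pyRange_one_succ_right (by positivity : (0 : Int) ≤ (k : Int)),
      show ((k : Int) + 1 + 1) = (((k : Int) + 1) + 1) from rfl,
      PySem.List.pyRange_one_succ_right (by omega : (1 : Int) ≤ (k : Int) + 1)]
    have hsplitA : ∀ init, pvAloop cmp l (PySem.List.pyRange 0 (k : Int) 1 ++ [(k : Int)]) init =
        pvAloop cmp l [(k : Int)] (pvAloop cmp l (PySem.List.pyRange 0 (k : Int) 1) init) := by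
      intro init; simp [pvAloop, List.foldl_append]
    have hsplitB : ∀ init, pvBloop cmp l (PySem.List.pyRange 1 ((k : Int) + 1) 1 ++ [(k : Int) + 1]) init =
        pvBloop cmp l [(k : Int) + 1] (pvBloop cmp l (PySem.List.pyRange 1 ((k : Int) + 1) 1) init) := by
      intro init; simp [pvBloop, List.foldl_append]
    rw [hsplitA, hsplitB]
    set A := pvAloop cmp l (PySem.List.pyRange 0 (k : Int) 1) (0, 0, ([] : List (Int × Int))) with hA
    set B := pvBloop cmp l (PySem.List.pyRange 1 ((k : Int) + 1) 1) (0, (0, 0), 0) with hB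
    have stepA : ∀ st : Int × Int × List (Int × Int), pvAloop cmp l [(k : Int)] st =
        if cmp (PySem.List.pyGetD l st.2.1 0) (PySem.List.pyGetD l (st.2.1 + 1) 0) = true then
          (st.1, st.2.1 + 1, st.2.2)
        else (st.2.1 + 1, st.2.1 + 1, st.2.2 ++ [(st.1, st.2.1)]) := fun st => rfl
    have stepB : ∀ st : Int × (Int × Int) × Int, pvBloop cmp l [(k : Int) + 1] st =
        if cmp (PySem.List.pyGetD l ((k : Int) + 1 - 1) 0) (PySem.List.pyGetD l ((k : Int) + 1) 0) = true then
          (st.1, if (k : Int) + 1 - st.1 > st.2.2 then ((st.1, (k : Int) + 1), (k : Int) + 1 - st.1) else st.2)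
        else ((k : Int) + 1, st.2) := fun st => rfl
    simp only [show ((k : Int) + 1 - 1) = (k : Int) from by ring] at stepB
    rw [stepA, stepB, ih1]
    by_cases hc : cmp (PySem.List.pyGetD l ((k : Int)) 0) (PySem.List.pyGetD l ((k : Int) + 1) 0) = true
    · rw [if_pos hc, if_pos hc]
      refine ⟨rfl, ih2, ih3, by omega, ?_, ?_, ?_⟩
      · show (if (k : Int) + 1 - B.1 > B.2.2 then ((B.1, (k : Int) + 1), (k : Int) + 1 - B.1) else B.2) =
          pvPick (A.2.2 ++ [(A.1, (k : Int) + 1)]) ((0, 0), 0)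
        rw [ih2, ih5]
        simp only [pvPick_append]
        rw [abs_of_nonneg (show (0 : Int) ≤ (k : Int) - A.1 by omega),
          abs_of_nonneg (show (0 : Int) ≤ (k : Int) + 1 - A.1 by omega)]
        have hP : (0 : Int) ≤ (pvPick A.2.2 ((0, 0), 0)).2 := pvPick_nonneg _ _ (le_refl 0)
        split_ifs <;> first
          | rfl
          | (exfalso; omega)
      · show (((A.2.2 ++ [(A.1, (k : Int) + 1)]).headD (0, 0)).1 = 0)
        cases hbs : A.2.2 with
        | nil => rw [hbs] at ih6; simpa using ih6
        | cons hd tl => rw [hbs] at ih6; simpa using ih6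
      · show (0 ≤ ((A.2.2 ++ [(A.1, (k : Int) + 1)]).headD (0, 0)).2)
        cases hbs : A.2.2 with
        | nil =>
          rw [hbs] at ih6 ih7
          simp only [List.nil_append, List.headD_cons]
          omega
        | cons hd tl => rw [hbs] at ih7; simpa using ih7
    · rw [if_neg hc, if_neg hc]
      refine ⟨rfl, rfl, by omega, by omega, ?_, ?_, ?_⟩
      · show B.2 = pvPick ((A.2.2 ++ [(A.1, (k : Int))]) ++ [((k : Int) + 1, (k : Int) + 1)]) ((0, 0), 0)
        rw [pvPick_append]
        have hQ : (0 : Int) ≤ (pvPick (A.2.2 ++ [(A.1, (k : Int))]) ((0, 0), 0)).2 :=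
          pvPick_nonneg _ _ (le_refl 0)
        rw [if_neg (by simp only [sub_self, abs_zero]; omega)]
        exact ih5
      · show ((((A.2.2 ++ [(A.1, (k : Int))]) ++ [((k : Int) + 1, (k : Int) + 1)]).headD (0, 0)).1 = 0)
        cases hbs : A.2.2 with
        | nil => rw [hbs] at ih6; simpa using ih6
        | cons hd tl => rw [hbs] at ih6; simpa using ih6
      · show (0 ≤ (((A.2.2 ++ [(A.1, (k : Int))]) ++ [((k : Int) + 1, (k : Int) + 1)]).headD (0, 0)).2)
        cases hbs : A.2.2 with
        | nil => rw [hbs] at ih7; simpa using ih7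
        | cons hd tl => rw [hbs] at ih7; simpa using ih7

-- A's indexed max scan equals pvPick
theorem pvScanIdx (full : List (Int × Int)) (bs : List (Int × Int)) (a : Nat)
    (h : full.drop a = bs) (m idx : Int)
    (hb : 0 ≤ m) :
    (PySem.List.pyGetD full ((PySem.List.pyRange (a : Int) (full.length : Int) 1).foldl
        (fun (st : Int × Int) (j : Int) =>
          let r := PySem.List.pyGetD full j ((0 : Int), (0 : Int))
          if |r.2 - r.1| > st.1 then (|r.2 - r.1|, j) else st) (m, idx)).2 ((0 : Int), (0 : Int)),
     ((PySem.List.pyRange (a : Int) (full.length : Int) 1).foldl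
        (fun (st : Int × Int) (j : Int) =>
          let r := PySem.List.pyGetD full j ((0 : Int), (0 : Int))
          if |r.2 - r.1| > st.1 then (|r.2 - r.1|, j) else st) (m, idx)).1) =
      (pvPick bs (PySem.List.pyGetD full idx ((0 : Int), (0 : Int)), m)) := by
  induction bs generalizing a m idx with
  | nil =>
    have ha : full.length ≤ a := by
      by_contra hlt
      push_neg at hlt
      have := List.drop_eq_getElem_cons hlt
      rw [h] at this
      exact List.cons_ne_nil _ _ this.symm
    rw [PySem.List.pyRange_one_eq_nil (by exact_mod_cast ha)]
    simp [pvPick]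
  | cons r t ih =>
    have ha : a < full.length := by
      by_contra hlt
      push_neg at hlt
      rw [List.drop_eq_nil_of_le hlt] at h
      exact List.cons_ne_nil _ _ h.symm
    have hdec := List.drop_eq_getElem_cons ha
    rw [h] at hdec
    obtain ⟨hget, hdrop⟩ : full[a] = r ∧ full.drop (a + 1) = t := by
      have h1 := hdec
      injection h1.symm with h1a h1b
      exact ⟨h1a, h1b⟩
    have hgd : PySem.List.pyGetD full ((a : Int)) ((0 : Int), (0 : Int)) = r := by
      rw [PySem.List.pyGetD_natCast, List.getD_eq_getElem _ _ ha, hget]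
    rw [PySem.List.pyRange_one_cons (by exact_mod_cast ha)]
    simp only [List.foldl_cons, hgd]
    by_cases hcond : |r.2 - r.1| > m
    · rw [if_pos hcond]
      have hcast : ((a : Int) + 1) = ((a + 1 : Nat) : Int) := by push_cast; ring
      rw [hcast]
      rw [ih (a + 1) hdrop (|r.2 - r.1|) ((a : Int)) (abs_nonneg _), hgd]
      simp only [pvPick, List.foldl_cons, if_pos hcond]
    · rw [if_neg hcond]
      have hcast : ((a : Int) + 1) = ((a + 1 : Nat) : Int) := by push_cast; ring
      rw [hcast]
      rw [ih (a + 1) hdrop m idx hb]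
      simp only [pvPick, List.foldl_cons, if_neg hcond]

theorem pvPick_concat (xs ys : List (Int × Int)) (st : (Int × Int) × Int) :
    pvPick (xs ++ ys) st = pvPick ys (pvPick xs st) := by
  simp [pvPick, List.foldl_append]

theorem pvFoldlProd {α β γ : Type} (r : List γ) (f : α → γ → α) (g : β → γ → β) (a : α) (b : β) :
    r.foldl (fun st i => (f st.1 i, g st.2 i)) (a, b) = (r.foldl f a, r.foldl g b) := by
  induction r generalizing a b with
  | nil => rfl
  | cons x t ih => simp only [List.foldl_cons]; exact ih _ _

theorem pvHeadD_append_left (xs : List (Int × Int)) (x : Int × Int) (ys : List (Int × Int))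
    (d : Int × Int) : ((xs ++ [x]) ++ ys).headD d = (xs ++ [x]).headD d := by
  cases xs <;> rfl

theorem pvHeadD_mem (xs : List (Int × Int)) (x : Int × Int) (d : Int × Int) :
    (xs ++ [x]).headD d ∈ xs ++ [x] := by
  cases xs <;> simp

theorem pvGet0 (xs : List (Int × Int)) (d : Int × Int) :
    PySem.List.pyGetD xs 0 d = xs.headD d := by
  rw [show (0 : Int) = ((0 : Nat) : Int) from rfl, PySem.List.pyGetD_natCast]
  cases xs <;> rfl

theorem pvScanA_pick (bs : List (Int × Int)) :
    PySem.List.pyGetD bs (pvScanA bs).2 ((0 : Int), (0 : Int)) =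
      (pvPick bs (PySem.List.pyGetD bs 0 ((0 : Int), (0 : Int)), 0)).1 := by
  have h := pvScanIdx bs bs 0 rfl 0 0 le_rfl
  rw [Nat.cast_zero] at h
  have h1 := congrArg Prod.fst h
  dsimp only at h1
  exact h1

theorem pvGuardFalse_len (l : List Int)
    (h : ¬((PySem.Set.ofList l).length = l.length ∨ (PySem.Set.ofList l).length = 1)) :
    2 ≤ l.length := by
  match l with
  | [] => exact absurd (Or.inl rfl) h
  | [x] => exact absurd (Or.inl rfl) h
  | x :: y :: t => simp

-- ===== VERDICT (by name: the statement is the Claim_ definition above) =====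
theorem pvA_id (l : List Int) (r : List Int) (init : Int × Int × List (Int × Int)) :
    pvIncRunsA l r init = pvAloop (fun a b => decide (a < b)) l r init ∧
    pvDecRunsA l r init = pvAloop (fun a b => decide (a > b)) l r init := by
  constructor
  · unfold pvIncRunsA pvAloop
    apply PySem.List.foldl_congr_mem
    intro acc x _
    simp
  · unfold pvDecRunsA pvAloop
    apply PySem.List.foldl_congr_mem
    intro acc x _
    simp

theorem pvB_id (l : List Int) (r : List Int) (x y : Int × (Int × Int) × Int) :
    r.foldl (pvStepB l) (x, y) =
      (pvBloop (fun a b => decide (a < b)) l r x, pvBloop (fun a b => decide (a > b)) l r y) := by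
  rw [show pvStepB l = (fun st i =>
      ((fun (s : Int × (Int × Int) × Int) (i : Int) =>
          if PySem.List.pyGetD l (i - 1) 0 < PySem.List.pyGetD l i 0 then
            (s.1, if i - s.1 > s.2.2 then ((s.1, i), i - s.1) else s.2)
          else (i, s.2)) st.1 i,
       (fun (s : Int × (Int × Int) × Int) (i : Int) =>
          if PySem.List.pyGetD l (i - 1) 0 > PySem.List.pyGetD l i 0 then
            (s.1, if i - s.1 > s.2.2 then ((s.1, i), i - s.1) else s.2)
          else (i, s.2)) st.2 i)) from rfl]
  rw [pvFoldlProd r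
    (fun (s : Int × (Int × Int) × Int) (i : Int) =>
        if PySem.List.pyGetD l (i - 1) 0 < PySem.List.pyGetD l i 0 then
          (s.1, if i - s.1 > s.2.2 then ((s.1, i), i - s.1) else s.2)
        else (i, s.2))
    (fun (s : Int × (Int × Int) × Int) (i : Int) =>
        if PySem.List.pyGetD l (i - 1) 0 > PySem.List.pyGetD l i 0 then
          (s.1, if i - s.1 > s.2.2 then ((s.1, i), i - s.1) else s.2)
        else (i, s.2)) x y]
  refine Prod.ext ?_ ?_ <;> dsimp only
  · unfold pvBloop
    apply PySem.List.foldl_congr_mem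
    intro acc i _
    simp
  · unfold pvBloop
    apply PySem.List.foldl_congr_mem
    intro acc i _
    simp

theorem border_search_spec : Claim_equal_border_search := by
  intro l _
  show border_search l = border_search_alt l
  unfold border_search border_search_alt
  dsimp only
  by_cases hg : (PySem.Set.ofList l).length = l.length ∨ (PySem.Set.ofList l).length = 1
  · rw [if_pos hg, if_pos hg]
  · rw [if_neg hg, if_neg hg]
    have hn : 2 ≤ l.length := pvGuardFalse_len l hg
    have hkc : (((l.length - 1 : Nat) : Int)) = (l.length : Int) - 1 := by omega
    have hkc2 : (((l.length - 1 : Nat) : Int)) + 1 = (l.length : Int) := by omega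
    rw [← hkc, ← hkc2]
    rw [(pvA_id l _ _).1, (pvA_id l _ _).2, pvB_id]
    set A1 := pvAloop (fun a b => decide (a < b)) l
      (PySem.List.pyRange 0 ((l.length - 1 : Nat) : Int) 1) (0, 0, ([] : List (Int × Int))) with hA1
    obtain ⟨ha1sp, hb1cs, ha1nn, ha1le, hpick1, hhead1, hhead1nn⟩ :=
      pvSim (fun a b => decide (a < b)) l (l.length - 1)
    rw [ha1sp]
    set RI := A1.2.2 ++ [(A1.1, ((l.length - 1 : Nat) : Int))] with hRI
    rw [pvAloop_bs (fun a b => decide (a > b)) l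
      (PySem.List.pyRange 0 ((l.length - 1 : Nat) : Int) 1) 0 0 RI]
    set A2 := pvAloop (fun a b => decide (a > b)) l
      (PySem.List.pyRange 0 ((l.length - 1 : Nat) : Int) 1) (0, 0, ([] : List (Int × Int))) with hA2
    obtain ⟨ha2sp, hb2cs, ha2nn, ha2le, hpick2, hhead2, hhead2nn⟩ :=
      pvSim (fun a b => decide (a > b)) l (l.length - 1)
    dsimp only
    rw [ha2sp, List.append_assoc]
    set RD := A2.2.2 ++ [(A2.1, ((l.length - 1 : Nat) : Int))] with hRD
    set B1 := pvBloop (fun a b => decide (a < b)) l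
      (PySem.List.pyRange 1 (((l.length - 1 : Nat) : Int) + 1) 1) (0, (0, 0), 0) with hB1
    set B2 := pvBloop (fun a b => decide (a > b)) l
      (PySem.List.pyRange 1 (((l.length - 1 : Nat) : Int) + 1) 1) (0, (0, 0), 0) with hB2
    rw [pvScanA_pick, pvGet0]
    have hhd : (RI ++ RD).headD (0, 0) = RI.headD (0, 0) := by
      rw [hRI]; exact pvHeadD_append_left _ _ _ _
    rw [hhd, pvPick_concat, pvPick_shift RI (RI.headD (0, 0)) 0 le_rfl]
    have hPI2 : (0 : Int) ≤ (pvPick RI ((0, 0), 0)).2 := pvPick_nonneg _ _ le_rfl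
    rw [max_eq_right hPI2, pvPick_shift RD _ _ hPI2]
    rw [hpick1, hpick2]
    dsimp only
    by_cases hcc : (pvPick RD ((0, 0), 0)).2 > (pvPick RI ((0, 0), 0)).2
    · rw [if_pos hcc, if_pos hcc]
    · rw [if_neg hcc, if_neg hcc]
      by_cases h0 : (pvPick RI ((0, 0), 0)).2 > 0
      · rw [if_pos h0]
      · rw [if_neg h0]
        have hPI1 : (pvPick RI ((0, 0), 0)).1 = ((0 : Int), (0 : Int)) := by
          have h := congrArg Prod.fst (pvPick_shift RI ((0, 0)) 0 le_rfl)
          dsimp only at h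
          rwa [if_neg h0] at h
        have hdm : RI.headD (0, 0) ∈ RI := by
          rw [hRI]; exact pvHeadD_mem _ _ _
        have hle := pvPick_le_mem RI ((0, 0), 0) _ hdm
        rw [hhead1, sub_zero] at hle
        have habs : (0 : Int) ≤ |(RI.headD (0, 0)).2| := abs_nonneg _
        have hself : (RI.headD (0, 0)).2 ≤ |(RI.headD (0, 0)).2| := le_abs_self _
        have h2 : (RI.headD (0, 0)).2 = 0 := by omega
        have hhdeq : RI.headD ((0 : Int), (0 : Int)) = ((0 : Int), (0 : Int)) :=
          Prod.ext hhead1 h2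
        rw [hhdeq, hPI1]
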